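-- pv_equiv track=rewrite | github.com/naren-m/dotfiles | alfred/audio_source_switcher.py | normalize_query
-- ===== SOURCE A (Python) =====
-- def normalize_query(query: str) -> tuple[str | None, str]:
--     normalized = query.strip().lower()
--     if not normalized:
--         return None, ""
--
--     prefixes = {
--         "out ": "output",
--         "output ": "output",
--         "speaker ": "output",
--         "speakers ": "output",
--         "in ": "input",
--         "input ": "input",
--         "mic ": "input",
--         "microphone ": "input",
--     }
--     for prefix, kind in prefixes.items():
--         if normalized.startswith(prefix):
--             return kind, normalized[len(prefix) :].strip()
--
--     return None, normalized
-- ===== SOURCE B (Python) =====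
-- def normalize_query(query: str) -> tuple[str | None, str]:
--     normalized = query.strip().lower()
--     if not normalized:
--         return None, ""
--     i = normalized.find(" ")
--     if i != -1:
--         kinds = {
--             "out": "output", "output": "output", "speaker": "output",
--             "speakers": "output", "in": "input", "input": "input",
--             "mic": "input", "microphone": "input",
--         }
--         kind = kinds.get(normalized[:i])
--         if kind is not None:
--             return kind, normalized[i + 1:].strip()
--     return None, normalized
-- ===== Notes on version B (the rewrite author's own statement) =====
-- stated objective: simpler
-- what changed: B replaces A's loop over eight space-terminated prefixes tested with startswith by a single split at the first space followed by one dict lookup of the bare first token.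
import Mathlib
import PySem

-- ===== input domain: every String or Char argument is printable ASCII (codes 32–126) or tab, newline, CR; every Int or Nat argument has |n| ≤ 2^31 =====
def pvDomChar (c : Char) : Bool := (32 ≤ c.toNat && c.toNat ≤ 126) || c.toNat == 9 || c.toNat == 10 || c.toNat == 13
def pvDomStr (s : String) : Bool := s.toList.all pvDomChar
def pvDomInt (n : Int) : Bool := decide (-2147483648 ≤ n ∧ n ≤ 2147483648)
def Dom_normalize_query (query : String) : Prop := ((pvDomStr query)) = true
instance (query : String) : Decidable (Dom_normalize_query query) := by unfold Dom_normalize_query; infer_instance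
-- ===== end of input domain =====

-- B replaces A's eight-way startswith scan by one split at the first space plus a single dict lookup (simpler; same O(|query|) cost).

-- ===== PORT A =====
-- the prefixes dict of A, as an insertion-ordered association list
def nqPrefixes : List (String × String) :=
  [("out ", "output"), ("output ", "output"), ("speaker ", "output"), ("speakers ", "output"),
   ("in ", "input"), ("input ", "input"), ("mic ", "input"), ("microphone ", "input")]

-- the 'for prefix, kind in prefixes.items():' loop of A
def nqLoop (normalized : String) : List (String × String) → Option String × String
  | [] => (none, normalized)
  | (p, kind) :: rest =>
    if PySem.Str.startswith normalized p then
      (some kind, PySem.Str.strip (PySem.Str.slice normalized (some (PySem.Str.len p)) none))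
    else nqLoop normalized rest

def normalize_query (query : String) : Option String × String :=
  let normalized := PySem.Str.lower (PySem.Str.strip query)
  if normalized = "" then (none, "")
  else nqLoop normalized nqPrefixes

-- ===== PORT B =====
-- B's keyword dict
def nqKinds : PySem.Dict String String :=
  PySem.Dict.ofList
    [("out", "output"), ("output", "output"), ("speaker", "output"), ("speakers", "output"),
     ("in", "input"), ("input", "input"), ("mic", "input"), ("microphone", "input")]

def normalize_query_alt (query : String) : Option String × String :=
  let normalized := PySem.Str.lower (PySem.Str.strip query)
  if normalized = "" then (none, "")
  else
    let i := PySem.Str.find normalized " "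
    if i ≠ -1 then
      match PySem.Dict.get? nqKinds (PySem.Str.slice normalized none (some i)) with
      | some kind => (some kind, PySem.Str.strip (PySem.Str.slice normalized (some (i + 1)) none))
      | none => (none, normalized)
    else (none, normalized)

-- ===== PRECONDITION & SPEC =====
def Spec_normalize_query (query : String) (out : Option String × String) : Prop := out = normalize_query_alt query
instance (query : String) (out : Option String × String) : Decidable (Spec_normalize_query query out) := by unfold Spec_normalize_query; infer_instance

-- ===== CLAIM (what is proved, stated in full; the proofs are below) =====
def Claim_equal_normalize_query : Prop := ∀ (query : String), Dom_normalize_query query → Spec_normalize_query query (normalize_query query)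

-- ===== LEMMAS AND PROOFS =====

set_option maxHeartbeats 1000000

lemma findgo_no_space (L : List Char) (k : Nat) (h : ' ' ∉ L) :
    PySem.Chars.find.go [' '] L k = -1 := by
  induction L generalizing k with
  | nil => simp [PySem.Chars.find.go]
  | cons a t ih =>
    have ha : ¬(' ' = a) := fun e => h (e ▸ List.mem_cons_self)
    have ht : ' ' ∉ t := fun hm => h (List.mem_cons_of_mem _ hm)
    simp [PySem.Chars.find.go, List.isPrefixOf, ha, ih _ ht]

lemma findgo_space (H R : List Char) (k : Nat) (h : ' ' ∉ H) :
    PySem.Chars.find.go [' '] (H ++ ' ' :: R) k = (k : Int) + H.length := by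
  induction H generalizing k with
  | nil => simp [PySem.Chars.find.go, List.isPrefixOf]
  | cons a t ih =>
    have ha : ¬(' ' = a) := fun e => h (e ▸ List.mem_cons_self)
    have ht : ' ' ∉ t := fun hm => h (List.mem_cons_of_mem _ hm)
    simp [PySem.Chars.find.go, List.isPrefixOf, ha, ih _ ht]
    omega

lemma prefix_space (w H R : List Char) (hw : ' ' ∉ w) (hH : ' ' ∉ H) :
    w ++ [' '] <+: H ++ ' ' :: R ↔ w = H := by
  induction w generalizing H with
  | nil =>
    cases H with
    | nil => simp
    | cons b H' =>
      have hb : ¬(' ' = b) := fun e => hH (e ▸ List.mem_cons_self)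
      simp [List.cons_prefix_cons, hb]
  | cons a w' ih =>
    have ha : ¬(a = ' ') := fun e => hw (e ▸ List.mem_cons_self)
    have hw' : ' ' ∉ w' := fun hm => hw (List.mem_cons_of_mem _ hm)
    cases H with
    | nil => simp [List.cons_prefix_cons, ha]
    | cons b H' =>
      have hH' : ' ' ∉ H' := fun hm => hH (List.mem_cons_of_mem _ hm)
      simp [List.cons_prefix_cons, ih H' hw' hH']

lemma split_first_space (L : List Char) (h : ' ' ∈ L) :
    ∃ H R, L = H ++ ' ' :: R ∧ ' ' ∉ H := by
  induction L with
  | nil => simp at h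
  | cons a t ih =>
    by_cases ha : a = ' '
    · exact ⟨[], t, by simp [ha], by simp⟩
    · have hm : ' ' ∈ t := by
        rcases List.mem_cons.mp h with h1 | h1
        · exact absurd h1.symm ha
        · exact h1
      obtain ⟨H, R, hL, hH⟩ := ih hm
      refine ⟨a :: H, R, by simp [hL], ?_⟩
      intro hmem
      rcases List.mem_cons.mp hmem with h1 | h1
      · exact ha h1.symm
      · exact hH h1

lemma nqLoop_no_space (n : String) (hs : ' ' ∉ n.toList) :
    ∀ ps : List (String × String), (∀ pk ∈ ps, ' ' ∈ pk.1.toList) → nqLoop n ps = (none, n) := by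
  intro ps
  induction ps with
  | nil => intro _; rfl
  | cons pk rest ih =>
    intro hmem
    obtain ⟨p, k⟩ := pk
    have hsp : ' ' ∈ p.toList := hmem (p, k) List.mem_cons_self
    have hfalse : ¬(PySem.Str.startswith n p = true) := by
      intro hby
      have htrue : p.toList.isPrefixOf n.toList = true := hby
      exact hs ((List.isPrefixOf_iff_prefix.mp htrue).subset hsp)
    simp only [nqLoop, if_neg hfalse]
    exact ih fun x hx => hmem x (List.mem_cons_of_mem _ hx)

lemma chain (n : String) (H R : List Char) (hL : n.toList = H ++ ' ' :: R) (hH : ' ' ∉ H) :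
    ∀ ws : List (String × String), (∀ pk ∈ ws, ' ' ∉ pk.1.toList) →
    nqLoop n (ws.map fun pk => (pk.1 ++ " ", pk.2)) =
      (match ws.find? (fun pk => pk.1 == String.ofList H) with
       | some pk => (some pk.2, PySem.Str.strip (String.ofList R))
       | none => (none, n)) := by
  intro ws
  induction ws with
  | nil => intro _; rfl
  | cons pk rest ih =>
    intro hmem
    obtain ⟨w, k⟩ := pk
    have hw : ' ' ∉ w.toList := hmem (w, k) List.mem_cons_self
    have hcond : PySem.Str.startswith n (w ++ " ") = true ↔ w.toList = H := by
      simp [PySem.Str.startswith, PySem.Chars.startswith, List.isPrefixOf_iff_prefix, hL]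
      exact prefix_space w.toList H R hw hH
    have hcond' : (w == String.ofList H) = true ↔ w.toList = H := by
      rw [beq_iff_eq, ← String.toList_inj, String.toList_ofList]
    by_cases hwH : w.toList = H
    · have h1 : PySem.Str.startswith n (w ++ " ") = true := hcond.mpr hwH
      have h2 : ((fun pk : String × String => pk.1 == String.ofList H) (w, k)) = true := hcond'.mpr hwH
      have hfq : List.find? (fun pk : String × String => pk.1 == String.ofList H) ((w, k) :: rest)
          = some (w, k) := List.find?_cons_of_pos h2
      simp only [List.map_cons, nqLoop, if_pos h1, hfq]
      have hlist : (w ++ " ").toList = H ++ [' '] := by simp [hwH]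
      have hlen : PySem.Str.len (w ++ " ") = ((H.length + 1 : Nat) : Int) := by
        simp [PySem.Str.len, hlist]
      have hdrop : List.drop (H.length + 1) (H ++ ' ' :: R) = R := by
        rw [show H ++ ' ' :: R = (H ++ [' ']) ++ R by simp,
            show H.length + 1 = (H ++ [' ']).length by simp, List.drop_left]
      have hsl : PySem.List.slice n.toList (some ((H.length + 1 : Nat) : Int)) none = R := by
        rw [PySem.List.slice_from_natCast, hL, hdrop]
      rw [hlen]
      simp only [PySem.Str.slice, PySem.Chars.slice, hsl]
    · have h1 : ¬(PySem.Str.startswith n (w ++ " ") = true) := fun hb => hwH (hcond.mp hb)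
      have h2 : ¬(((fun pk : String × String => pk.1 == String.ofList H) (w, k)) = true) :=
        fun hb => hwH (hcond'.mp hb)
      have hfq : List.find? (fun pk : String × String => pk.1 == String.ofList H) ((w, k) :: rest)
          = List.find? (fun pk : String × String => pk.1 == String.ofList H) rest :=
        List.find?_cons_of_neg h2
      simp only [List.map_cons, nqLoop, if_neg h1, hfq]
      exact ih fun x hx => hmem x (List.mem_cons_of_mem _ hx)

lemma main_eq (n : String) :
    nqLoop n nqPrefixes =
      (if PySem.Str.find n " " ≠ -1 then
         match PySem.Dict.get? nqKinds (PySem.Str.slice n none (some (PySem.Str.find n " "))) with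
         | some kind =>
             (some kind, PySem.Str.strip (PySem.Str.slice n (some (PySem.Str.find n " " + 1)) none))
         | none => (none, n)
       else (none, n)) := by
  have hws : (" " : String).toList = [' '] := by decide
  by_cases hs : ' ' ∈ n.toList
  · obtain ⟨H, R, hL, hH⟩ := split_first_space n.toList hs
    have hfindS : PySem.Str.find n " " = (H.length : Int) := by
      show PySem.Chars.find n.toList (" " : String).toList = _
      rw [hws]
      show PySem.Chars.find.go [' '] n.toList 0 = _
      rw [hL, findgo_space H R 0 hH]
      simp
    have hslice1 : PySem.List.slice n.toList none (some (H.length : Int)) = H := by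
      rw [PySem.List.slice_to_natCast, hL, List.take_left]
    have hdrop : List.drop (H.length + 1) (H ++ ' ' :: R) = R := by
      rw [show H ++ ' ' :: R = (H ++ [' ']) ++ R by simp,
          show H.length + 1 = (H ++ [' ']).length by simp, List.drop_left]
    have hslice2 : PySem.List.slice n.toList (some ((H.length : Int) + 1)) none = R := by
      rw [show ((H.length : Int) + 1) = ((H.length + 1 : Nat) : Int) by push_cast; ring,
          PySem.List.slice_from_natCast, hL, hdrop]
    have hS1 : PySem.Str.slice n none (some (H.length : Int)) = String.ofList H := by
      simp only [PySem.Str.slice, PySem.Chars.slice, hslice1]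
    have hS2 : PySem.Str.slice n (some ((H.length : Int) + 1)) none = String.ofList R := by
      simp only [PySem.Str.slice, PySem.Chars.slice, hslice2]
    have hitems : nqKinds.items =
        [("out", "output"), ("output", "output"), ("speaker", "output"), ("speakers", "output"),
         ("in", "input"), ("input", "input"), ("mic", "input"), ("microphone", "input")] := by decide
    have hG : PySem.Dict.get? nqKinds (String.ofList H) =
        Option.map (fun x => x.2)
          (List.find? (fun pk : String × String => pk.1 == String.ofList H)
            [("out", "output"), ("output", "output"), ("speaker", "output"), ("speakers", "output"),
             ("in", "input"), ("input", "input"), ("mic", "input"), ("microphone", "input")]) := by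
      simp only [PySem.Dict.get?, hitems]
    have hmap : nqPrefixes =
        (List.map (fun pk => (pk.1 ++ " ", pk.2))
          [("out", "output"), ("output", "output"), ("speaker", "output"), ("speakers", "output"),
           ("in", "input"), ("input", "input"), ("mic", "input"), ("microphone", "input")]) := by decide
    have hne : ((H.length : Int)) ≠ -1 := by omega
    rw [hmap, chain n H R hL hH _ (by decide), hfindS, if_pos hne, hS1, hS2, hG]
    cases hfq : List.find? (fun pk : String × String => pk.1 == String.ofList H)
        [("out", "output"), ("output", "output"), ("speaker", "output"), ("speakers", "output"),
         ("in", "input"), ("input", "input"), ("mic", "input"), ("microphone", "input")] with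
    | none => simp
    | some pk => simp
  · have hfindS : PySem.Str.find n " " = -1 := by
      show PySem.Chars.find n.toList (" " : String).toList = _
      rw [hws]
      exact findgo_no_space n.toList 0 hs
    rw [nqLoop_no_space n hs nqPrefixes (by decide)]
    rw [hfindS]
    simp

-- ===== VERDICT (by name: the statement is the Claim_ definition above) =====
theorem normalize_query_spec : Claim_equal_normalize_query := by
  intro query _
  unfold Spec_normalize_query normalize_query normalize_query_alt
  by_cases h : PySem.Str.lower (PySem.Str.strip query) = ""
  · simp [h]
  · simp only [h, if_false]
    exact main_eq _
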